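-- pv_equiv track=rewrite | github.com/prototyp037/final | transformer/preprocessing.py | get_instrument_name_from_program
-- ===== SOURCE A (Python) =====
-- INSTRUMENT_CLASSES = [
--     (0, 8, 'Piano'),
--     (8, 16, 'ChromaticPercussion'),
--     (16, 24, 'Organ'),
--     (24, 32, 'Guitar'),
--     (32, 40, 'Bass'),
--     (40, 48, 'Strings'),
--     (48, 56, 'Ensemble'),
--     (56, 64, 'Brass'),
--     (64, 72, 'Reed'),
--     (72, 80, 'Pipe'),
--     (80, 88, 'SynthLead'),
--     (88, 96, 'SynthPad'),
--     (96, 104, 'SynthEffects'),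
--     (104, 112, 'Ethnic'),
--     (112, 120, 'Percussive'),
--     (120, 128, 'SoundEffects')
-- ]
--
-- def get_instrument_name_from_program(program):
--     """
--     Maps MIDI program (or 'Drums') back to frontend instrument name.
--     """
--     if program == 'Drums': return 'drums'
--     try:
--         prog = int(program)
--         # Use INSTRUMENT_CLASSES to find the category
--         for start, end, name in INSTRUMENT_CLASSES:
--             if start <= prog < end:
--                 # Map category to frontend name
--                 if name == 'Piano': return 'piano'
--                 if name == 'Bass': return 'bass'
--                 if name == 'Strings' or name == 'Ensemble': return 'strings'
--                 # Map others to piano for now as we only have 4 synths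
--                 return 'piano'
--     except:
--         pass
--     return 'piano'
-- ===== SOURCE B (Python) =====
-- def get_instrument_name_from_program(program):
--     if program == 'Drums':
--         return 'drums'
--     try:
--         prog = int(program)
--     except Exception:
--         return 'piano'
--     if 32 <= prog < 40:
--         return 'bass'
--     if 40 <= prog < 56:
--         return 'strings'
--     return 'piano'
-- ===== Notes on version B (the rewrite author's own statement) =====
-- stated objective: simpler
-- what changed: Replaces the scan over the 16-entry INSTRUMENT_CLASSES table plus inner name dispatch with direct closed-form range checks (32-39 bass, 40-55 strings, everything else piano).
import Mathlib
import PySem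

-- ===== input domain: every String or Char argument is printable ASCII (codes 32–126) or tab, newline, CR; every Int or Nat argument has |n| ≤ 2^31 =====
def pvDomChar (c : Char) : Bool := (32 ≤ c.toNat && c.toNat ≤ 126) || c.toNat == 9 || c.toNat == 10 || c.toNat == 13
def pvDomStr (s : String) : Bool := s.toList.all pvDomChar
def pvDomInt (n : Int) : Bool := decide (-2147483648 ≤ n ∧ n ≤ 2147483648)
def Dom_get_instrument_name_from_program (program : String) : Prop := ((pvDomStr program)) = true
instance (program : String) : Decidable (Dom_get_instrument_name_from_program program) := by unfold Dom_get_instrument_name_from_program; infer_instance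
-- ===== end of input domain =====

-- B replaces A's scan of the 16-entry INSTRUMENT_CLASSES table (with an inner name dispatch)
-- by direct closed-form range checks; objective: simpler.

-- ===== PORT A =====
def pvInstrumentClasses : List (Int × Int × String) :=
  [(0, 8, "Piano"), (8, 16, "ChromaticPercussion"), (16, 24, "Organ"), (24, 32, "Guitar"),
   (32, 40, "Bass"), (40, 48, "Strings"), (48, 56, "Ensemble"), (56, 64, "Brass"),
   (64, 72, "Reed"), (72, 80, "Pipe"), (80, 88, "SynthLead"), (88, 96, "SynthPad"),
   (96, 104, "SynthEffects"), (104, 112, "Ethnic"), (112, 120, "Percussive"),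
   (120, 128, "SoundEffects")]

-- the inner category → frontend-name dispatch of A's loop body
def pvMapName (name : String) : String :=
  if name = "Piano" then "piano"
  else if name = "Bass" then "bass"
  else if name = "Strings" ∨ name = "Ensemble" then "strings"
  else "piano"

-- the for-loop over INSTRUMENT_CLASSES
def pvScanA (prog : Int) : List (Int × Int × String) → Option String
  | [] => none
  | (s, e, name) :: rest =>
    if s ≤ prog ∧ prog < e then some (pvMapName name)
    else pvScanA prog rest

def get_instrument_name_from_program (program : String) : String :=
  if program = "Drums" then "drums"
  else
    match PySem.Int.ofStr? program with   -- int(program); none = ValueError, caught by the bare except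
    | none => "piano"
    | some prog =>
      match pvScanA prog pvInstrumentClasses with
      | some r => r
      | none => "piano"                   -- loop fell through: final return 'piano'

-- ===== PORT B =====
def get_instrument_name_from_program_alt (program : String) : String :=
  if program = "Drums" then "drums"
  else
    match PySem.Int.ofStr? program with   -- int(program); none = caught exception, return 'piano'
    | none => "piano"
    | some prog =>
      if 32 ≤ prog ∧ prog < 40 then "bass"
      else if 40 ≤ prog ∧ prog < 56 then "strings"
      else "piano"

-- ===== PRECONDITION & SPEC =====
def Spec_get_instrument_name_from_program (program : String) (out : String) : Prop := out = get_instrument_name_from_program_alt program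
instance (program : String) (out : String) : Decidable (Spec_get_instrument_name_from_program program out) := by unfold Spec_get_instrument_name_from_program; infer_instance

-- ===== CLAIM (what is proved, stated in full; the proofs are below) =====
def Claim_equal_get_instrument_name_from_program : Prop := ∀ (program : String), Dom_get_instrument_name_from_program program → Spec_get_instrument_name_from_program program (get_instrument_name_from_program program)

-- ===== LEMMAS AND PROOFS =====

set_option maxHeartbeats 1000000 in
theorem pvScanA_eq (prog : Int) :
    pvScanA prog pvInstrumentClasses
    = (if 0 ≤ prog ∧ prog < 128 then
        some (if 32 ≤ prog ∧ prog < 40 then "bass"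
              else if 40 ≤ prog ∧ prog < 56 then "strings" else "piano")
       else none) := by
  simp only [pvScanA, pvInstrumentClasses,
    show pvMapName "Piano" = "piano" from rfl,
    show pvMapName "ChromaticPercussion" = "piano" from rfl,
    show pvMapName "Organ" = "piano" from rfl,
    show pvMapName "Guitar" = "piano" from rfl,
    show pvMapName "Bass" = "bass" from rfl,
    show pvMapName "Strings" = "strings" from rfl,
    show pvMapName "Ensemble" = "strings" from rfl,
    show pvMapName "Brass" = "piano" from rfl,
    show pvMapName "Reed" = "piano" from rfl,
    show pvMapName "Pipe" = "piano" from rfl,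
    show pvMapName "SynthLead" = "piano" from rfl,
    show pvMapName "SynthPad" = "piano" from rfl,
    show pvMapName "SynthEffects" = "piano" from rfl,
    show pvMapName "Ethnic" = "piano" from rfl,
    show pvMapName "Percussive" = "piano" from rfl,
    show pvMapName "SoundEffects" = "piano" from rfl]
  by_cases h0 : (0:Int) ≤ prog ∧ prog < 8
  · rw [if_pos h0, if_pos (show (0:Int) ≤ prog ∧ prog < 128 by omega)]
    split_ifs <;> first | rfl | omega
  rw [if_neg h0]
  by_cases h1 : (8:Int) ≤ prog ∧ prog < 16
  · rw [if_pos h1, if_pos (show (0:Int) ≤ prog ∧ prog < 128 by omega)]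
    split_ifs <;> first | rfl | omega
  rw [if_neg h1]
  by_cases h2 : (16:Int) ≤ prog ∧ prog < 24
  · rw [if_pos h2, if_pos (show (0:Int) ≤ prog ∧ prog < 128 by omega)]
    split_ifs <;> first | rfl | omega
  rw [if_neg h2]
  by_cases h3 : (24:Int) ≤ prog ∧ prog < 32
  · rw [if_pos h3, if_pos (show (0:Int) ≤ prog ∧ prog < 128 by omega)]
    split_ifs <;> first | rfl | omega
  rw [if_neg h3]
  by_cases h4 : (32:Int) ≤ prog ∧ prog < 40
  · rw [if_pos h4, if_pos (show (0:Int) ≤ prog ∧ prog < 128 by omega)]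
    split_ifs <;> rfl
  rw [if_neg h4]
  by_cases h5 : (40:Int) ≤ prog ∧ prog < 48
  · rw [if_pos h5, if_pos (show (0:Int) ≤ prog ∧ prog < 128 by omega)]
    split_ifs <;> first | rfl | omega
  rw [if_neg h5]
  by_cases h6 : (48:Int) ≤ prog ∧ prog < 56
  · rw [if_pos h6, if_pos (show (0:Int) ≤ prog ∧ prog < 128 by omega)]
    split_ifs <;> first | rfl | omega
  rw [if_neg h6]
  by_cases h7 : (56:Int) ≤ prog ∧ prog < 64
  · rw [if_pos h7, if_pos (show (0:Int) ≤ prog ∧ prog < 128 by omega)]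
    split_ifs <;> first | rfl | omega
  rw [if_neg h7]
  by_cases h8 : (64:Int) ≤ prog ∧ prog < 72
  · rw [if_pos h8, if_pos (show (0:Int) ≤ prog ∧ prog < 128 by omega)]
    split_ifs <;> first | rfl | omega
  rw [if_neg h8]
  by_cases h9 : (72:Int) ≤ prog ∧ prog < 80
  · rw [if_pos h9, if_pos (show (0:Int) ≤ prog ∧ prog < 128 by omega)]
    split_ifs <;> first | rfl | omega
  rw [if_neg h9]
  by_cases h10 : (80:Int) ≤ prog ∧ prog < 88
  · rw [if_pos h10, if_pos (show (0:Int) ≤ prog ∧ prog < 128 by omega)]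
    split_ifs <;> first | rfl | omega
  rw [if_neg h10]
  by_cases h11 : (88:Int) ≤ prog ∧ prog < 96
  · rw [if_pos h11, if_pos (show (0:Int) ≤ prog ∧ prog < 128 by omega)]
    split_ifs <;> first | rfl | omega
  rw [if_neg h11]
  by_cases h12 : (96:Int) ≤ prog ∧ prog < 104
  · rw [if_pos h12, if_pos (show (0:Int) ≤ prog ∧ prog < 128 by omega)]
    split_ifs <;> first | rfl | omega
  rw [if_neg h12]
  by_cases h13 : (104:Int) ≤ prog ∧ prog < 112
  · rw [if_pos h13, if_pos (show (0:Int) ≤ prog ∧ prog < 128 by omega)]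
    split_ifs <;> first | rfl | omega
  rw [if_neg h13]
  by_cases h14 : (112:Int) ≤ prog ∧ prog < 120
  · rw [if_pos h14, if_pos (show (0:Int) ≤ prog ∧ prog < 128 by omega)]
    split_ifs <;> first | rfl | omega
  rw [if_neg h14]
  by_cases h15 : (120:Int) ≤ prog ∧ prog < 128
  · rw [if_pos h15, if_pos (show (0:Int) ≤ prog ∧ prog < 128 by omega)]
    split_ifs <;> first | rfl | omega
  rw [if_neg h15]
  rw [if_neg (show ¬((0:Int) ≤ prog ∧ prog < 128) by omega)]

theorem pvScanA_match_eq (prog : Int) :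
    (match pvScanA prog pvInstrumentClasses with | some r => r | none => "piano")
    = (if 32 ≤ prog ∧ prog < 40 then "bass"
       else if 40 ≤ prog ∧ prog < 56 then "strings" else "piano") := by
  rw [pvScanA_eq]
  by_cases hr : 0 ≤ prog ∧ prog < 128
  · rw [if_pos hr]
  · rw [if_neg hr,
      if_neg (show ¬(32 ≤ prog ∧ prog < 40) by omega),
      if_neg (show ¬(40 ≤ prog ∧ prog < 56) by omega)]

-- ===== VERDICT (by name: the statement is the Claim_ definition above) =====
theorem get_instrument_name_from_program_spec : Claim_equal_get_instrument_name_from_program := by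
  intro program _
  unfold Spec_get_instrument_name_from_program
  unfold get_instrument_name_from_program get_instrument_name_from_program_alt
  by_cases h : program = "Drums"
  · simp [h]
  · simp only [if_neg h]
    cases PySem.Int.ofStr? program with
    | none => rfl
    | some prog => exact pvScanA_match_eq prog
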